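-- pv_equiv track=rewrite | github.com/Hans945945/My-Python-Code | c104.py | dfs
-- ===== SOURCE A (Python) =====
-- def is_safe(row, col, queens):
--     for r, c in enumerate(queens):
--         if c == col or abs(row-r) == abs(c-col):
--             return 0
--     return 1
--
-- def dfs(row, queens, board, Sum):
--     if row == 8:
--         return Sum
--     max_sum = 0
--     for c in range(8):
--         if is_safe(row,c,queens):
--             queens.append(c)
--             max_sum = max(max_sum, dfs(row+1, queens, board, Sum + board[row][c]))
--             queens.pop()
--     return max_sum
-- ===== SOURCE B (Python) =====
-- # Level-by-level frontier expansion instead of recursive backtracking; queens is not mutated (A mutates it only transiently, net-unchanged).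
-- def dfs(row, queens, board, Sum):
--     if row == 8:
--         return Sum
--     frontier = [(tuple(queens), Sum)]
--     for r in range(row, 8):
--         frontier = [(q + (c,), s + board[r][c])
--                     for q, s in frontier
--                     for c in range(8)
--                     if all(qc != c and abs(r - i) != abs(qc - c)
--                            for i, qc in enumerate(q))]
--     return max([0] + [s for _, s in frontier])
-- ===== Notes on version B (the rewrite author's own statement) =====
-- stated objective: alternative
-- what changed: A's recursive backtracking with a per-level max(0,...) floor and transient queens mutation is replaced by a level-by-level breadth-first frontier of partial placements (list of (queens,sum) pairs expanded row by row) with one final max over [0]+totals.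
-- outside the precondition, e.g. on dfs(9, [0, 1, 2, 3, 4, 5, 6, 7], [], 5): A returns 0, B returns 5; on dfs(0, [1, 2, 3, 4, 5, 6, 7], [[5]], 0): A returns 0, B returns 0
import Mathlib
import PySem

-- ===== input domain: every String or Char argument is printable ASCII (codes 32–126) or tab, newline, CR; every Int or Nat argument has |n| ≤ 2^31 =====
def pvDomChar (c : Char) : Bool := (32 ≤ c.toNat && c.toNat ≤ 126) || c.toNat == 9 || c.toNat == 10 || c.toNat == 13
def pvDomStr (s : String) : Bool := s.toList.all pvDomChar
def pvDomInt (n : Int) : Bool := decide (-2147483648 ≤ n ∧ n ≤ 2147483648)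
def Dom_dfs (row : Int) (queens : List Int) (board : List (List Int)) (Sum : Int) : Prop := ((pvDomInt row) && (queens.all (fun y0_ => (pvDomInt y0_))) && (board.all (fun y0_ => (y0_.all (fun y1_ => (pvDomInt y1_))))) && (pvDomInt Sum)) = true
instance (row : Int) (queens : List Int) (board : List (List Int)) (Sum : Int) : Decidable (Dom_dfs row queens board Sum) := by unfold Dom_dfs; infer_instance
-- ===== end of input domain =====

-- B replaces A's recursive backtracking (with its per-level 0-floor) by a level-by-level
-- frontier expansion and one final max-with-0; same search, objective: alternative.
-- A mutates `queens` only transiently (append then pop, net-unchanged); B does not touch it.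

-- ===== PORT A =====
-- is_safe: loop over enumerate(queens), return 0 on hit, else 1
def isSafeAux (row col : Int) : List (Int × Int) → Int
  | [] => 1
  | (r, c) :: rest =>
    if c = col ∨ (row - r).natAbs = (c - col).natAbs then 0 else isSafeAux row col rest

def is_safe (row col : Int) (queens : List Int) : Int :=
  isSafeAux row col (PySem.List.enumerate queens 0)

-- board[row][c]; the defaults never fire inside Pre_dfs (Python either raises there, or
-- the cell is never reached because the row is unreachable)
def boardAt (board : List (List Int)) (r c : Int) : Int :=
  PySem.List.pyGetD (PySem.List.pyGetD board r []) c 0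

-- the recursion, with fuel = number of rows left until 8 (totality guard only;
-- inside Pre_dfs it is never exhausted)
def dfsAux (fuel : Nat) (row : Int) (queens : List Int) (board : List (List Int)) (s : Int) : Int :=
  if row = 8 then s
  else
    match fuel with
    | 0 => 0
    | f + 1 =>
      (PySem.List.pyRange 0 8 1).foldl
        (fun maxSum c =>
          if is_safe row c queens ≠ 0 then
            max maxSum (dfsAux f (row + 1) (queens ++ [c]) board (s + boardAt board row c))
          else maxSum) 0

def dfs (row : Int) (queens : List Int) (board : List (List Int)) (Sum : Int) : Int :=
  dfsAux (8 - row).toNat row queens board Sum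

-- ===== PORT B =====
-- all(qc != c and abs(r - i) != abs(qc - c) for i, qc in enumerate(q))
def safeAllAux (r c : Int) : List (Int × Int) → Bool
  | [] => true
  | (i, qc) :: rest =>
    (decide (qc ≠ c) && decide ((r - i).natAbs ≠ (qc - c).natAbs)) && safeAllAux r c rest

def safeAll (r : Int) (q : List Int) (c : Int) : Bool :=
  safeAllAux r c (PySem.List.enumerate q 0)

-- one level of the comprehension: expand every partial placement by every safe column
def stepRow (board : List (List Int)) (r : Int) (fr : List (List Int × Int)) : List (List Int × Int) :=
  fr.flatMap (fun qs =>
    ((PySem.List.pyRange 0 8 1).filter (fun c => safeAll r qs.1 c)).map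
      (fun c => (qs.1 ++ [c], qs.2 + boardAt board r c)))

def dfs_alt (row : Int) (queens : List Int) (board : List (List Int)) (Sum : Int) : Int :=
  if row = 8 then Sum
  else
    let frontier := (PySem.List.pyRange row 8 1).foldl (fun fr r => stepRow board r fr) [(queens, Sum)]
    (frontier.map Prod.snd).foldl max 0

-- ===== PRECONDITION & SPEC =====
-- Pre_ restricts to the function's natural domain, row ∈ [0,8] (a count of already-placed
-- rows; for row > 8 Python A diverges or raises except in a degenerate fully-blocked corner,
-- and negative rows only work through Python's negative-index wraparound, outside the task's
-- meaning), and requires either a full 8-column board on the rows the search can visit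
-- (A raises on smaller boards whenever it touches a missing cell — which cells A touches
-- depends on the search, so this is a slight overapproximation) or that every column is
-- already attacked by `queens` at the starting row, in which case A touches no cell at all;
-- cites in claim.json give excluded inputs on which A still returns, and B's values there.
def Pre_dfs (row : Int) (queens : List Int) (board : List (List Int)) (Sum : Int) : Prop :=
  row = 8
  ∨ (0 ≤ row ∧ row < 8 ∧
      ((8 ≤ board.length ∧ ∀ r ∈ (board.take 8).drop row.toNat, 8 ≤ r.length)
       ∨ (∀ c ∈ PySem.List.pyRange 0 8 1, ∃ p ∈ PySem.List.enumerate queens 0,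
            p.2 = c ∨ (row - p.1).natAbs = (p.2 - c).natAbs)))
instance (row : Int) (queens : List Int) (board : List (List Int)) (Sum : Int) : Decidable (Pre_dfs row queens board Sum) := by unfold Pre_dfs; infer_instance

def pvWitness_dfs : Int × List Int × List (List Int) × Int := (8, [], [], 5)

def Spec_dfs (row : Int) (queens : List Int) (board : List (List Int)) (Sum : Int) (out : Int) : Prop := out = dfs_alt row queens board Sum
instance (row : Int) (queens : List Int) (board : List (List Int)) (Sum : Int) (out : Int) : Decidable (Spec_dfs row queens board Sum out) := by unfold Spec_dfs; infer_instance

-- ===== CLAIM (what is proved, stated in full; the proofs are below) =====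
def Claim_equal_dfs : Prop := ∀ (row : Int) (queens : List Int) (board : List (List Int)) (Sum : Int), Dom_dfs row queens board Sum → Pre_dfs row queens board Sum → Spec_dfs row queens board Sum (dfs row queens board Sum)

-- ===== LEMMAS AND PROOFS =====

-- abbreviations for B's pieces
def runRows (board : List (List Int)) (rows : List Int) (fr : List (List Int × Int)) : List (List Int × Int) :=
  rows.foldl (fun fr r => stepRow board r fr) fr

def mfold (xs : List Int) : Int := xs.foldl max 0

def res (board : List (List Int)) (rows : List Int) (fr : List (List Int × Int)) : Int :=
  mfold ((runRows board rows fr).map Prod.snd)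

theorem stepRow_append (board : List (List Int)) (r : Int) (xs ys : List (List Int × Int)) :
    stepRow board r (xs ++ ys) = stepRow board r xs ++ stepRow board r ys := by
  simp [stepRow]

theorem stepRow_nil (board : List (List Int)) (r : Int) : stepRow board r [] = [] := by
  simp [stepRow]

theorem runRows_append (board : List (List Int)) (rows : List Int) (xs ys : List (List Int × Int)) :
    runRows board rows (xs ++ ys) = runRows board rows xs ++ runRows board rows ys := by
  induction rows generalizing xs ys with
  | nil => simp [runRows]
  | cons r rest ih =>
    simp only [runRows, List.foldl_cons] at *
    rw [stepRow_append, ih]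

theorem runRows_nil (board : List (List Int)) (rows : List Int) : runRows board rows [] = [] := by
  induction rows with
  | nil => rfl
  | cons r rest ih => simp only [runRows, List.foldl_cons, stepRow_nil] at *; exact ih

theorem foldl_max_shift (xs : List Int) (a b : Int) :
    xs.foldl max (max a b) = max a (xs.foldl max b) := by
  induction xs generalizing b with
  | nil => simp
  | cons x t ih => simp only [List.foldl_cons, max_assoc, ih]

theorem mfold_nonneg (xs : List Int) : 0 ≤ mfold xs :=
  (PySem.List.le_foldl_max xs 0).1

theorem mfold_append (xs ys : List Int) : mfold (xs ++ ys) = max (mfold xs) (mfold ys) := by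
  have h : max (mfold xs) 0 = mfold xs := max_eq_left (mfold_nonneg xs)
  calc mfold (xs ++ ys) = ys.foldl max (mfold xs) := by simp [mfold, List.foldl_append]
    _ = ys.foldl max (max (mfold xs) 0) := by rw [h]
    _ = max (mfold xs) (mfold ys) := foldl_max_shift ys (mfold xs) 0

theorem res_append (board : List (List Int)) (rows : List Int) (xs ys : List (List Int × Int)) :
    res board rows (xs ++ ys) = max (res board rows xs) (res board rows ys) := by
  simp only [res, runRows_append, List.map_append, mfold_append]

theorem res_nil (board : List (List Int)) (rows : List Int) : res board rows [] = 0 := by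
  simp [res, runRows_nil, mfold]

-- shifting the base of a max-fold out (h-keyed form of foldl_max_shift)
theorem foldl_max_h_shift (h : Int → Int) (cs : List Int) (a b : Int) :
    cs.foldl (fun acc c => max acc (h c)) (max a b)
      = max a (cs.foldl (fun acc c => max acc (h c)) b) := by
  have := foldl_max_shift (cs.map h) a b
  simpa [List.foldl_map] using this

-- res of a map over columns is a fold of maxes of singleton results
theorem res_map (board : List (List Int)) (rows : List Int)
    (g : Int → List Int × Int) (cs : List Int) :
    res board rows (cs.map g) = cs.foldl (fun acc c => max acc (res board rows [g c])) 0 := by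
  induction cs with
  | nil => simp [res_nil]
  | cons c t ih =>
    have h1 : (g c :: t.map g) = [g c] ++ t.map g := rfl
    simp only [List.map_cons, List.foldl_cons, h1, res_append]
    rw [show max (0:Int) (res board rows [g c]) = max (res board rows [g c]) 0 from max_comm _ _,
        foldl_max_h_shift, ← ih]

theorem isSafeAux_ne_zero_iff (row col : Int) (l : List (Int × Int)) :
    (isSafeAux row col l ≠ 0) ↔ (safeAllAux row col l = true) := by
  induction l with
  | nil => simp [isSafeAux, safeAllAux]
  | cons p t ih =>
    obtain ⟨r, c⟩ := p
    by_cases h : c = col ∨ (row - r).natAbs = (c - col).natAbs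
    · simp [isSafeAux, safeAllAux, h]
      rcases h with h | h
      · intro hne; exact absurd h hne
      · intro _ hne; exact absurd h hne
    · push Not at h
      simp [isSafeAux, safeAllAux, h.1, h.2, ih]

theorem safe_iff (row c : Int) (q : List Int) :
    (is_safe row c q ≠ 0) ↔ (safeAll row q c = true) := by
  simpa [is_safe, safeAll] using isSafeAux_ne_zero_iff row c (PySem.List.enumerate q 0)

-- A's fold over range-with-if equals a fold over the filtered columns
theorem foldl_if_filter (q : List Int) (row : Int) (h : Int → Int) (cs : List Int) (a : Int) :
    cs.foldl (fun acc c => if is_safe row c q ≠ 0 then max acc (h c) else acc) a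
      = (cs.filter (fun c => safeAll row q c)).foldl (fun acc c => max acc (h c)) a := by
  have hfun : ∀ (acc c : Int),
      (if is_safe row c q ≠ 0 then max acc (h c) else acc)
        = (if safeAll row q c then max acc (h c) else acc) := by
    intro acc c
    by_cases hb : safeAll row q c = true
    · rw [if_pos ((safe_iff row c q).mpr hb), if_pos hb]
    · rw [if_neg (fun hh => hb ((safe_iff row c q).mp hh)),
        if_neg (by simpa using hb)]
  simp only [hfun]
  exact (List.foldl_filter ..).symm

-- clamping each element with max 0 does not change a max-fold from base 0
theorem foldl_max_clamp (h : Int → Int) (cs : List Int) :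
    max 0 (cs.foldl (fun acc c => max acc (h c)) 0)
      = cs.foldl (fun acc c => max acc (max 0 (h c))) 0 := by
  induction cs with
  | nil => simp
  | cons c t ih =>
    have s1 : t.foldl (fun acc c => max acc (h c)) (max 0 (h c))
        = max (max 0 (h c)) (t.foldl (fun acc c => max acc (h c)) 0) := by
      have := foldl_max_shift (t.map h) (max 0 (h c)) 0
      simp only [List.foldl_map] at this
      simpa using this
    have s2 : t.foldl (fun acc c => max acc (max 0 (h c))) (max 0 (max 0 (h c)))
        = max (max 0 (h c)) (t.foldl (fun acc c => max acc (max 0 (h c))) 0) := by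
      have := foldl_max_shift (t.map (fun c => max 0 (h c))) (max 0 (h c)) 0
      simp only [List.foldl_map] at this
      simpa using this
    simp only [List.foldl_cons]
    rw [s1, s2, ← ih]
    omega

-- MAIN LEMMA: the floored value of A's recursion is B's frontier result
theorem dfsAux_res (board : List (List Int)) :
    ∀ (fuel : Nat) (r : Int) (q : List Int) (s : Int), r = 8 - (fuel : Int) →
      max 0 (dfsAux fuel r q board s) = res board (PySem.List.pyRange r 8 1) [(q, s)] := by
  intro fuel
  induction fuel with
  | zero =>
    intro r q s hr
    subst hr
    simp [dfsAux, res, runRows, PySem.List.pyRange_one_eq_nil (by omega : (8:Int) ≤ 8), mfold]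
  | succ f ih =>
    intro r q s hr
    have hrlt : r < 8 := by omega
    have hr8 : r ≠ 8 := by omega
    rw [PySem.List.pyRange_one_cons hrlt]
    have hrun : res board (r :: PySem.List.pyRange (r+1) 8 1) [(q, s)]
        = res board (PySem.List.pyRange (r+1) 8 1) (stepRow board r [(q, s)]) := by
      simp [res, runRows]
    rw [hrun]
    have hstep : stepRow board r [(q, s)]
        = ((PySem.List.pyRange 0 8 1).filter (fun c => safeAll r q c)).map
            (fun c => (q ++ [c], s + boardAt board r c)) := by
      simp [stepRow]
    rw [hstep]
    set cs := (PySem.List.pyRange 0 8 1).filter (fun c => safeAll r q c) with hcs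
    rw [res_map board (PySem.List.pyRange (r+1) 8 1)
        (fun c => (q ++ [c], s + boardAt board r c)) cs]
    have hA : dfsAux (f+1) r q board s
        = cs.foldl (fun acc c =>
            max acc (dfsAux f (r + 1) (q ++ [c]) board (s + boardAt board r c))) 0 := by
      rw [dfsAux]
      simp only [if_neg hr8]
      exact foldl_if_filter q r _ (PySem.List.pyRange 0 8 1) 0
    rw [hA, foldl_max_clamp]
    have hpt : ∀ (acc c : Int),
        max acc (max 0 (dfsAux f (r + 1) (q ++ [c]) board (s + boardAt board r c)))
          = max acc (res board (PySem.List.pyRange (r+1) 8 1) [(q ++ [c], s + boardAt board r c)]) := by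
      intro acc c
      rw [ih (r+1) (q ++ [c]) (s + boardAt board r c) (by omega)]
    simp only [hpt]

-- A's recursion is nonnegative below row 8 (its fold starts at 0 and only takes maxes)
theorem dfsAux_nonneg (fuel : Nat) (r : Int) (q : List Int) (board : List (List Int)) (s : Int)
    (hr : r ≠ 8) : 0 ≤ dfsAux fuel r q board s := by
  cases fuel with
  | zero => simp [dfsAux, hr]
  | succ f =>
    rw [dfsAux]
    simp only [if_neg hr]
    have : ∀ (cs : List Int) (a : Int), 0 ≤ a →
        0 ≤ cs.foldl (fun maxSum c =>
          if is_safe r c q ≠ 0 then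
            max maxSum (dfsAux f (r + 1) (q ++ [c]) board (s + boardAt board r c))
          else maxSum) a := by
      intro cs
      induction cs with
      | nil => intro a ha; simpa using ha
      | cons c t ihc =>
        intro a ha
        simp only [List.foldl_cons]
        apply ihc
        split
        · exact le_trans ha (le_max_left _ _)
        · exact ha
    exact this _ 0 le_rfl

-- ===== VERDICT (by name: the statement is the Claim_ definition above) =====
theorem dfs_spec : Claim_equal_dfs := by
  intro row queens board Sum _hdom hpre
  unfold Spec_dfs
  have hle : row ≤ 8 := by
    rcases hpre with h | ⟨_, h, _⟩ <;> omega
  by_cases h8 : row = 8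
  · subst h8
    simp [dfs, dfsAux, dfs_alt]
  · have hne : row ≠ 8 := h8
    have hfuel : row = 8 - (((8 - row).toNat : Nat) : Int) := by omega
    have hmain := dfsAux_res board (8 - row).toNat row queens Sum hfuel
    have hnn := dfsAux_nonneg (8 - row).toNat row queens board Sum hne
    unfold dfs dfs_alt
    simp only [if_neg hne]
    rw [show (PySem.List.pyRange row 8 1).foldl (fun fr r => stepRow board r fr) [(queens, Sum)]
        = runRows board (PySem.List.pyRange row 8 1) [(queens, Sum)] from rfl]
    have : max 0 (dfsAux (8 - row).toNat row queens board Sum)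
        = dfsAux (8 - row).toNat row queens board Sum := max_eq_right hnn
    rw [← this, hmain]
    rfl
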